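-- pv_equiv track=rewrite | github.com/ssoglet/algorithm_study | week 3/3085.py | check
-- ===== SOURCE A (Python) =====
-- def check(arr):
--     n = len(arr)
--     answer = 1
--
--     for i in range(n):
--         count = 1
--         for j in range(1,n):
--             if arr[j][i] == arr[j-1][i]:
--                 count += 1
--             else:
--                 count = 1
--             if count > answer:
--                 answer = count
--
--         count = 1
--         for j in range(1,n):
--             if arr[i][j] == arr[i][j-1]:
--                 count += 1
--             else:
--                 count = 1
--             if count > answer:
--                 answer = count
--
--     return answer
-- ===== SOURCE B (Python) =====
-- def check(arr):
--     n = len(arr)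
--     rows = [row[:n] for row in arr]
--     m = min((len(r) for r in rows), default=0)
--     lines = rows + [[row[i] for row in rows] for i in range(m)]
--     best = 1
--     for seq in lines:
--         L = len(seq)
--         cuts = [0] + [k for k in range(1, L) if seq[k] != seq[k - 1]] + [L]
--         for a, b in zip(cuts, cuts[1:]):
--             if b - a > best:
--                 best = b - a
--     return best
-- ===== Notes on version B (the rewrite author's own statement) =====
-- stated objective: alternative
-- what changed: Instead of A's running counter updated cell by cell, B computes for each row and each column the list of breakpoint indices where adjacent cells differ and takes the maximal gap between consecutive cut positions, folding one max over all lines.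
import Mathlib
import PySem

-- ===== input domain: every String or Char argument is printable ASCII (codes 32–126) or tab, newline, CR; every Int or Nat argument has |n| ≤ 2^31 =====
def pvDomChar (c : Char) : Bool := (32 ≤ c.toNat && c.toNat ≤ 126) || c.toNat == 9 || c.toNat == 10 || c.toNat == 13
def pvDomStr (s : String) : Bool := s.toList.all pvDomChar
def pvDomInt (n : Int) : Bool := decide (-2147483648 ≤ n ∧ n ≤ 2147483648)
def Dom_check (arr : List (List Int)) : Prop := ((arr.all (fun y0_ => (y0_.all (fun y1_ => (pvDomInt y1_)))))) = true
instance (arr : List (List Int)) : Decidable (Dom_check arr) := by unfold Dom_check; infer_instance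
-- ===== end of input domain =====

-- B replaces A's running-counter scan by a breakpoint/gap algorithm: per line it lists the
-- indices where adjacent cells differ and takes the maximal gap between consecutive cuts
-- (objective: alternative, same asymptotic cost).


-- ===== PORT A =====
-- arr[j][i] (both indices are Python ints, in range on every admitted input)
def pyAt (arr : List (List Int)) (j i : Int) : Int :=
  PySem.List.pyGetD (PySem.List.pyGetD arr j ([] : List Int)) i 0

def check (arr : List (List Int)) : Int :=
  let n : Int := arr.length
  (PySem.List.pyRange 0 n 1).foldl (fun answer i =>
    let colRes := (PySem.List.pyRange 1 n 1).foldl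
      (fun (st : Int × Int) j =>
        let count := if pyAt arr j i = pyAt arr (j - 1) i then st.1 + 1 else 1
        let answer := if count > st.2 then count else st.2
        (count, answer)) (1, answer)
    let rowRes := (PySem.List.pyRange 1 n 1).foldl
      (fun (st : Int × Int) j =>
        let count := if pyAt arr i j = pyAt arr i (j - 1) then st.1 + 1 else 1
        let answer := if count > st.2 then count else st.2
        (count, answer)) (1, colRes.2)
    rowRes.2) 1

-- ===== PORT B =====
def check_alt (arr : List (List Int)) : Int :=
  let n : Int := arr.length
  let rows := arr.map (fun row => PySem.List.slice row none (some n))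
  let m : Int := (PySem.List.min? (rows.map (fun r => (r.length : Int))) (fun x => x)).getD 0
  let lines := rows ++ (PySem.List.pyRange 0 m 1).map
      (fun i => rows.map (fun row => PySem.List.pyGetD row i 0))
  lines.foldl (fun best seq =>
    let L : Int := seq.length
    let cuts := [(0 : Int)] ++ (PySem.List.pyRange 1 L 1).filter
        (fun k => PySem.List.pyGetD seq k 0 != PySem.List.pyGetD seq (k - 1) 0) ++ [L]
    (cuts.zip cuts.tail).foldl
      (fun best ab => if ab.2 - ab.1 > best then ab.2 - ab.1 else best) best) 1

-- ===== PRECONDITION & SPEC =====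
-- Pre_ excludes exactly the ragged grids (two or more rows, some row shorter than the row
-- count) on which A raises IndexError; every input on which A returns satisfies Pre_.
def Pre_check (arr : List (List Int)) : Prop :=
  arr.length ≤ 1 ∨ ∀ row ∈ arr, arr.length ≤ row.length
instance (arr : List (List Int)) : Decidable (Pre_check arr) := by unfold Pre_check; infer_instance

def pvWitness_check : List (List Int) := [[1, 2], [3, 3]]

def Spec_check (arr : List (List Int)) (out : Int) : Prop := out = check_alt arr
instance (arr : List (List Int)) (out : Int) : Decidable (Spec_check arr out) := by unfold Spec_check; infer_instance

-- ===== CLAIM (what is proved, stated in full; the proofs are below) =====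
def Claim_equal_check : Prop := ∀ (arr : List (List Int)), Dom_check arr → Pre_check arr → Spec_check arr (check arr)

-- ===== LEMMAS AND PROOFS =====

-- the step of A's inner counter scan, named for the proofs: state (best, cur, prev)
def pvStep : Int × Int × Int → Int → Int × Int × Int := fun st x =>
  let cur := if x = st.2.2 then st.2.1 + 1 else 1
  let best := if cur > st.1 then cur else st.1
  (best, cur, x)

-- specification value: the longest run of a line, via A's counter scan
def longestRun (seq : List Int) : Int :=
  match seq with
  | [] => 1
  | h :: t => (t.foldl pvStep (1, 1, h)).1

-- structural form of B's breakpoint list: indices ≥ k where the element differs from its predecessor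
def breaksFrom (k prev : Int) : List Int → List Int
  | [] => []
  | x :: t => if x != prev then k :: breaksFrom (k + 1) x t else breaksFrom (k + 1) x t

-- structural form of B's gap fold over the cut list
def foldPairs (last best : Int) : List Int → Int
  | [] => best
  | c :: cs => foldPairs c (max best (c - last)) cs

theorem pv_if_max (c a : Int) : (if c > a then c else a) = max a c := by
  split <;> omega

-- the best component of the fold never decreases
theorem pvStep_mono : ∀ (t : List Int) (st : Int × Int × Int), st.1 ≤ (t.foldl pvStep st).1 := by
  intro t
  induction t with
  | nil => intro st; simp
  | cons x t ih =>
    intro st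
    refine le_trans ?_ (ih (pvStep st x))
    simp only [pvStep]
    split <;> omega

-- the best component starts at 1 and stays ≥ 1
theorem pvStep_best_ge_one (t : List Int) (c p : Int) :
    1 ≤ (t.foldl pvStep (1, c, p)).1 :=
  pvStep_mono t (1, c, p)

-- extracting the accumulated best: fold from best = a equals max a (fold from best = 1)
theorem pvStep_hoist : ∀ (t : List Int) (a c p : Int), 1 ≤ a →
    (t.foldl pvStep (a, c, p)).1 = max a (t.foldl pvStep (1, c, p)).1 := by
  intro t
  induction t with
  | nil => intro a c p ha; simp; omega
  | cons x t ih =>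
    intro a c p ha
    simp only [List.foldl_cons, pvStep]
    rw [pv_if_max, pv_if_max]
    set c' := if x = p then c + 1 else 1 with hc'
    rw [ih (max a c') c' x (by omega), ih (max 1 c') c' x (by omega)]
    have h1 := pvStep_best_ge_one t c' x
    omega

-- B's zip-with-tail max-gap fold is the structural pair fold
theorem zip_fold_eq : ∀ (cs : List Int) (last best : Int),
    (((last :: cs).zip cs).foldl
        (fun b (ab : Int × Int) => if ab.2 - ab.1 > b then ab.2 - ab.1 else b) best)
      = foldPairs last best cs := by
  intro cs
  induction cs with
  | nil => intro last best; rfl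
  | cons c cs ih =>
    intro last best
    simp only [List.zip_cons_cons, List.foldl_cons, foldPairs]
    rw [pv_if_max (c - last) best]
    exact ih c (max best (c - last))

-- the gap fold over the breakpoints of a suffix equals A's counter scan over that suffix
theorem foldPairs_breaks : ∀ (t : List Int) (k last b prev : Int),
    foldPairs last b (breaksFrom k prev t ++ [k + (t.length : Int)])
      = (t.foldl pvStep (max b (k - last), k - last, prev)).1 := by
  intro t
  induction t with
  | nil =>
    intro k last b prev
    simp [breaksFrom, foldPairs]
  | cons x t ih =>
    intro k last b prev
    have hlen : (k + ((x :: t).length : Int)) = (k + 1) + (t.length : Int) := by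
      simp only [List.length_cons]; push_cast; ring
    by_cases hx : x = prev
    · have hb : (x != prev) = false := by simp [hx]
      rw [breaksFrom, hb]
      simp only [Bool.false_eq_true, if_false, hlen]
      rw [ih (k + 1) last b x]
      simp only [List.foldl_cons, pvStep, hx, if_true, pv_if_max]
      have h1 : max (max b (k - last)) (k - last + 1) = max b (k + 1 - last) := by omega
      have h2 : (k - last + 1) = (k + 1 - last) := by omega
      rw [h1, h2]
    · have hb : (x != prev) = true := by simp [hx]
      rw [breaksFrom, hb]
      simp only [if_true, List.cons_append, foldPairs, hlen]
      rw [ih (k + 1) k (max b (k - last)) x]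
      simp only [List.foldl_cons, pvStep, if_neg hx, pv_if_max]
      have h1 : max (max b (k - last)) (k + 1 - k) = max (max b (k - last)) 1 := by omega
      rw [h1, show k + 1 - k = (1 : Int) by ring]

-- B's index filter over range(1, len) is the structural breakpoint list
theorem filter_idx_eq (xs : List Int) :
    ∀ (t : List Int) (h : Int) (k : Nat), 1 ≤ k → xs.drop (k - 1) = h :: t →
      (PySem.List.pyRange (k : Int) ((k : Int) + t.length) 1).filter
          (fun j => PySem.List.pyGetD xs j 0 != PySem.List.pyGetD xs (j - 1) 0)
        = breaksFrom (k : Int) h t := by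
  intro t
  induction t with
  | nil =>
    intro h k hk hd
    rw [PySem.List.pyRange_one_eq_nil (by simp)]
    rfl
  | cons x t ih =>
    intro h k hk hd
    have hxk : xs[k]? = some x := by
      have : (xs.drop (k - 1))[1]? = some x := by rw [hd]; rfl
      rwa [List.getElem?_drop, Nat.sub_add_cancel hk] at this
    have hxk1 : xs[k - 1]? = some h := by
      have : (xs.drop (k - 1))[0]? = some h := by rw [hd]; rfl
      rwa [List.getElem?_drop, Nat.add_zero] at this
    have hcons : PySem.List.pyRange (k : Int) ((k : Int) + (x :: t).length) 1
        = (k : Int) :: PySem.List.pyRange ((k : Int) + 1) ((k : Int) + (x :: t).length) 1 := by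
      apply PySem.List.pyRange_one_cons
      simp only [List.length_cons]
      push_cast
      omega
    rw [hcons, List.filter_cons]
    have hg1 : PySem.List.pyGetD xs (k : Int) 0 = x := by
      simp [PySem.List.pyGetD_natCast, List.getD, hxk]
    have hg2 : PySem.List.pyGetD xs ((k : Int) - 1) 0 = h := by
      have : ((k : Int) - 1) = ((k - 1 : Nat) : Int) := by omega
      rw [this]
      simp [PySem.List.pyGetD_natCast, List.getD, hxk1]
    rw [hg1, hg2]
    have hdk : xs.drop ((k + 1) - 1) = x :: t := by
      have : xs.drop (k - 1 + 1) = x :: t := by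
        rw [← List.drop_drop]
        · rw [hd]; rfl
      rwa [Nat.sub_add_cancel hk] at this
    have harith : ((k : Int) + 1) = (((k + 1 : Nat)) : Int) := by push_cast; ring
    have hlen : ((k : Int) + (x :: t).length) = (((k + 1 : Nat) : Int) + t.length) := by
      simp only [List.length_cons]; push_cast; ring
    rw [harith, hlen, ih x (k + 1) (by omega) hdk, breaksFrom, ← harith]

-- B's per-line computation: cut list, then maximal gap, folded into best ≥ 1
theorem line_eq (seq : List Int) (best : Int) (hb : 1 ≤ best) :
    (let L : Int := seq.length
     let cuts := [(0 : Int)] ++ (PySem.List.pyRange 1 L 1).filter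
        (fun k => PySem.List.pyGetD seq k 0 != PySem.List.pyGetD seq (k - 1) 0) ++ [L]
     (cuts.zip cuts.tail).foldl
       (fun best ab => if ab.2 - ab.1 > best then ab.2 - ab.1 else best) best)
      = max best (longestRun seq) := by
  cases seq with
  | nil =>
    simp only [List.length_nil, Nat.cast_zero]
    rw [PySem.List.pyRange_one_eq_nil (by norm_num)]
    simp only [List.filter_nil, List.nil_append, List.cons_append, List.tail_cons,
      List.zip_cons_cons, List.zip_nil_right, List.foldl_cons, List.foldl_nil, longestRun]
    rw [pv_if_max]
    omega
  | cons h t =>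
    simp only
    have hlen : ((List.length (h :: t) : Nat) : Int) = (1 : Int) + (t.length : Int) := by
      simp only [List.length_cons]; push_cast; ring
    rw [hlen]
    have hfil := filter_idx_eq (h :: t) t h 1 (by omega) (by simp)
    push_cast at hfil
    rw [hfil]
    have hcuts : ([(0 : Int)] ++ breaksFrom 1 h t ++ [1 + (t.length : Int)])
        = (0 : Int) :: (breaksFrom 1 h t ++ [1 + (t.length : Int)]) := by simp
    rw [hcuts]
    rw [show ((0 : Int) :: (breaksFrom 1 h t ++ [1 + (t.length : Int)])).tail
        = breaksFrom 1 h t ++ [1 + (t.length : Int)] from rfl]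
    rw [zip_fold_eq, foldPairs_breaks t 1 0 best h]
    simp only [longestRun]
    rw [show max best (1 - 0) = best by omega, show (1 : Int) - 0 = 1 by ring]
    exact pvStep_hoist t best 1 h hb

-- A's index-based inner loop equals the structural predecessor-tracking fold
theorem fold_idx_eq (xs : List Int) :
    ∀ (t : List Int) (h : Int) (k : Nat) (st : Int × Int),
      1 ≤ k → xs.drop (k - 1) = h :: t →
      (PySem.List.pyRange (k : Int) ((k : Int) + t.length) 1).foldl
        (fun (st : Int × Int) j =>
          let count := if PySem.List.pyGetD xs j 0 = PySem.List.pyGetD xs (j - 1) 0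
                       then st.1 + 1 else 1
          let answer := if count > st.2 then count else st.2
          (count, answer)) st
      = ((t.foldl pvStep (st.2, st.1, h)).2.1, (t.foldl pvStep (st.2, st.1, h)).1) := by
  intro t
  induction t with
  | nil =>
    intro h k st hk hd
    rw [PySem.List.pyRange_one_eq_nil (by simp)]
    simp
  | cons x t ih =>
    intro h k st hk hd
    have hxk : xs[k]? = some x := by
      have : (xs.drop (k - 1))[1]? = some x := by rw [hd]; rfl
      rwa [List.getElem?_drop, Nat.sub_add_cancel hk] at this
    have hxk1 : xs[k - 1]? = some h := by
      have : (xs.drop (k - 1))[0]? = some h := by rw [hd]; rfl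
      rwa [List.getElem?_drop, Nat.add_zero] at this
    have hcons : PySem.List.pyRange (k : Int) ((k : Int) + (x :: t).length) 1
        = (k : Int) :: PySem.List.pyRange ((k : Int) + 1) ((k : Int) + (x :: t).length) 1 := by
      apply PySem.List.pyRange_one_cons
      simp only [List.length_cons]
      push_cast
      omega
    rw [hcons, List.foldl_cons]
    have hg1 : PySem.List.pyGetD xs (k : Int) 0 = x := by
      simp [PySem.List.pyGetD_natCast, List.getD, hxk]
    have hg2 : PySem.List.pyGetD xs ((k : Int) - 1) 0 = h := by
      have : ((k : Int) - 1) = ((k - 1 : Nat) : Int) := by omega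
      rw [this]
      simp [PySem.List.pyGetD_natCast, List.getD, hxk1]
    rw [hg1, hg2]
    have hdk : xs.drop ((k + 1) - 1) = x :: t := by
      have : xs.drop (k - 1 + 1) = x :: t := by
        rw [← List.drop_drop]
        · rw [hd]; rfl
      rwa [Nat.sub_add_cancel hk] at this
    have harith : ((k : Int) + 1) = (((k + 1 : Nat)) : Int) := by push_cast; ring
    have hlen : ((k : Int) + (x :: t).length) = (((k + 1 : Nat) : Int) + t.length) := by
      simp only [List.length_cons]; push_cast; ring
    rw [harith, hlen]
    rw [ih x (k + 1) _ (by omega) hdk]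
    simp only [pvStep, List.foldl_cons]

-- A's inner loop over a nonempty line (answer starting at a ≥ 1) yields max a (longestRun line)
theorem inner_answer (xs : List Int) (h : Int) (t : List Int) (a N : Int)
    (hx : xs = h :: t) (ha : 1 ≤ a) (hN : N = (xs.length : Int)) :
    ((PySem.List.pyRange 1 N 1).foldl
        (fun (st : Int × Int) j =>
          let count := if PySem.List.pyGetD xs j 0 = PySem.List.pyGetD xs (j - 1) 0
                       then st.1 + 1 else 1
          let answer := if count > st.2 then count else st.2
          (count, answer)) (1, a)).2
      = max a (longestRun xs) := by
  subst hN
  subst hx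
  have hlen : ((h :: t).length : Int) = (1 : Int) + (t.length : Int) := by
    simp only [List.length_cons]; push_cast; ring
  rw [hlen]
  have H := fold_idx_eq (h :: t) t h 1 (1, a) (by omega) (by simp)
  push_cast at H
  rw [H]
  simp only [longestRun]
  rw [pvStep_hoist t a 1 h ha]

-- max-fold extraction: fold of max over l from max s₁ s₂ = max s₁ (fold from s₂)
theorem max_fold_hoist (f : Int → Int) :
    ∀ (l : List Int) (s₁ s₂ : Int),
      l.foldl (fun a i => max a (f i)) (max s₁ s₂) = max s₁ (l.foldl (fun a i => max a (f i)) s₂) := by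
  intro l
  induction l with
  | nil => intro s₁ s₂; rfl
  | cons x l ih =>
    intro s₁ s₂
    simp only [List.foldl_cons]
    rw [max_assoc, ih]

-- interleaved max-fold splits into the rows pass followed by the columns pass
theorem fold_cr_split (c r : Int → Int) :
    ∀ (l : List Int) (s : Int),
      l.foldl (fun a i => max (max a (c i)) (r i)) s
        = l.foldl (fun a i => max a (c i)) (l.foldl (fun a i => max a (r i)) s) := by
  intro l
  induction l with
  | nil => intro s; rfl
  | cons x l ih =>
    intro s
    simp only [List.foldl_cons]
    rw [ih]
    have h1 : max (max s (c x)) (r x) = max (c x) (max s (r x)) := by omega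
    rw [h1, max_fold_hoist r l (c x) (max s (r x))]
    have h2 : max (l.foldl (fun a i => max a (r i)) (max s (r x))) (c x)
        = max (c x) (l.foldl (fun a i => max a (r i)) (max s (r x))) := by omega
    rw [h2]

-- a fold whose body agrees with another under an invariant preserved by the latter
theorem foldl_inv_congr {α : Type} (f g : Int → α → Int) (P : Int → Prop) :
    ∀ (l : List α) (b : Int), P b →
      (∀ x ∈ l, ∀ b, P b → f b x = g b x ∧ P (g b x)) →
      l.foldl f b = l.foldl g b := by
  intro l
  induction l with
  | nil => intro b _ _; rfl
  | cons x l ih =>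
    intro b hb hfg
    simp only [List.foldl_cons]
    obtain ⟨heq, hP⟩ := hfg x (by simp) b hb
    rw [heq]
    exact ih _ hP (fun y hy => hfg y (by simp [hy]))

-- the column i of arr, as a list over j
def colList (arr : List (List Int)) (i : Int) : List Int :=
  arr.map (fun row => PySem.List.pyGetD row i 0)

-- the row i of arr truncated to n
def rowList (arr : List (List Int)) (i : Int) : List Int :=
  (PySem.List.pyGetD arr i ([] : List Int)).take arr.length

theorem colList_length (arr : List (List Int)) (i : Int) :
    (colList arr i).length = arr.length := by simp [colList]

-- arr[j][i] = (column i)[j] for j in range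
theorem pyAt_col (arr : List (List Int)) (i j : Int)
    (hj : 0 ≤ j) (hjn : j < (arr.length : Int)) :
    pyAt arr j i = PySem.List.pyGetD (colList arr i) j 0 := by
  have hj' : j.toNat < arr.length := by omega
  rw [pyAt, PySem.List.pyGetD_eq_getElem arr ([] : List Int) hj (by omega),
      PySem.List.pyGetD_eq_getElem (colList arr i) 0 hj (by simpa [colList_length] using hjn)]
  simp [colList]

theorem rowList_length (arr : List (List Int)) (i : Int)
    (hfull : ∀ row ∈ arr, arr.length ≤ row.length) (hi : 0 ≤ i) (hin : i < (arr.length : Int)) :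
    (rowList arr i).length = arr.length := by
  have hi' : i.toNat < arr.length := by omega
  have hmem : arr[i.toNat] ∈ arr := List.getElem_mem hi'
  have hrow := hfull _ hmem
  rw [rowList, PySem.List.pyGetD_eq_getElem arr ([] : List Int) hi (by omega), List.length_take]
  omega

-- arr[i][j] = (row i truncated)[j] for j in range, given full rows
theorem pyAt_row (arr : List (List Int)) (i j : Int)
    (hfull : ∀ row ∈ arr, arr.length ≤ row.length)
    (hi : 0 ≤ i) (hin : i < (arr.length : Int))
    (hj : 0 ≤ j) (hjn : j < (arr.length : Int)) :
    pyAt arr i j = PySem.List.pyGetD (rowList arr i) j 0 := by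
  have hi' : i.toNat < arr.length := by omega
  have hrow := hfull _ (List.getElem_mem hi')
  have hlen : (rowList arr i).length = arr.length := rowList_length arr i hfull hi hin
  rw [pyAt, PySem.List.pyGetD_eq_getElem arr ([] : List Int) hi (by omega),
      PySem.List.pyGetD_eq_getElem _ 0 hj (by omega),
      PySem.List.pyGetD_eq_getElem (rowList arr i) 0 hj (by omega)]
  simp only [rowList, PySem.List.pyGetD_eq_getElem arr ([] : List Int) hi (by omega : (i:Int) < (arr.length:Int))]
  rw [List.getElem_take]

-- longest run of column i / of row i (truncated), the per-line values both sides fold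
def cF (arr : List (List Int)) (i : Int) : Int := longestRun (colList arr i)
def rF (arr : List (List Int)) (i : Int) : Int := longestRun (rowList arr i)

-- A's outer loop computes the interleaved max-fold of the per-line longest runs
theorem checkA_eq (arr : List (List Int)) (hfull : ∀ row ∈ arr, arr.length ≤ row.length) :
    check arr = (PySem.List.pyRange 0 (arr.length : Int) 1).foldl
      (fun a i => max (max a (cF arr i)) (rF arr i)) 1 := by
  unfold check
  apply foldl_inv_congr _ _ (fun b => 1 ≤ b) _ 1 (by norm_num)
  intro i hi b hb
  rw [PySem.List.mem_pyRange_one] at hi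
  constructor
  · simp only [cF, rF]
    have hcolbody : (PySem.List.pyRange 1 (arr.length : Int) 1).foldl
        (fun (st : Int × Int) j =>
          let count := if pyAt arr j i = pyAt arr (j - 1) i then st.1 + 1 else 1
          let answer := if count > st.2 then count else st.2
          (count, answer)) (1, b)
        = (PySem.List.pyRange 1 (arr.length : Int) 1).foldl
        (fun (st : Int × Int) j =>
          let count := if PySem.List.pyGetD (colList arr i) j 0
                        = PySem.List.pyGetD (colList arr i) (j - 1) 0 then st.1 + 1 else 1
          let answer := if count > st.2 then count else st.2
          (count, answer)) (1, b) := by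
      apply PySem.List.foldl_congr_mem
      intro st j hj
      rw [PySem.List.mem_pyRange_one] at hj
      rw [pyAt_col arr i j (by omega) (by omega), pyAt_col arr i (j - 1) (by omega) (by omega)]
    have hrowbody : ∀ (init : Int × Int), (PySem.List.pyRange 1 (arr.length : Int) 1).foldl
        (fun (st : Int × Int) j =>
          let count := if pyAt arr i j = pyAt arr i (j - 1) then st.1 + 1 else 1
          let answer := if count > st.2 then count else st.2
          (count, answer)) init
        = (PySem.List.pyRange 1 (arr.length : Int) 1).foldl
        (fun (st : Int × Int) j =>
          let count := if PySem.List.pyGetD (rowList arr i) j 0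
                        = PySem.List.pyGetD (rowList arr i) (j - 1) 0 then st.1 + 1 else 1
          let answer := if count > st.2 then count else st.2
          (count, answer)) init := by
      intro init
      apply PySem.List.foldl_congr_mem
      intro st j hj
      rw [PySem.List.mem_pyRange_one] at hj
      rw [pyAt_row arr i j hfull (by omega) (by omega) (by omega) (by omega),
          pyAt_row arr i (j - 1) hfull (by omega) (by omega) (by omega) (by omega)]
    have hclen : ((colList arr i).length : Int) = (arr.length : Int) := by
      rw [colList_length]
    have hrlen : ((rowList arr i).length : Int) = (arr.length : Int) := by
      rw [rowList_length arr i hfull (by omega) (by omega)]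
    have hcpos : colList arr i ≠ [] := by
      intro hempty
      have := colList_length arr i
      rw [hempty] at this
      simp at this
      omega
    obtain ⟨ch, ct, hct⟩ := List.exists_cons_of_ne_nil hcpos
    have hrpos : rowList arr i ≠ [] := by
      intro hempty
      have := rowList_length arr i hfull (by omega) (by omega)
      rw [hempty] at this
      simp at this
      omega
    obtain ⟨rh, rt, hrt⟩ := List.exists_cons_of_ne_nil hrpos
    rw [hcolbody, inner_answer (colList arr i) ch ct b _ hct hb hclen.symm]
    rw [hrowbody, inner_answer (rowList arr i) rh rt (max b (longestRun (colList arr i))) _ hrt (by omega) hrlen.symm]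
  · omega

-- all-equal fold of min stays put
theorem foldl_min_const : ∀ (l : List Int) (c : Int), (∀ x ∈ l, x = c) → l.foldl min c = c := by
  intro l
  induction l with
  | nil => intro c _; rfl
  | cons x l ih =>
    intro c hx
    simp only [List.foldl_cons]
    rw [hx x (by simp), min_self]
    exact ih c (fun y hy => hx y (by simp [hy]))

-- B folds max of the per-line longest runs over the rows pass and then the columns pass
theorem checkB_eq (arr : List (List Int)) (hfull : ∀ row ∈ arr, arr.length ≤ row.length) :
    check_alt arr = (PySem.List.pyRange 0 (arr.length : Int) 1).foldl
      (fun a i => max a (cF arr i))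
      ((PySem.List.pyRange 0 (arr.length : Int) 1).foldl (fun a i => max a (rF arr i)) 1) := by
  unfold check_alt
  simp only [PySem.List.slice_to_natCast]
  have hm : (PySem.List.min? ((arr.map (fun row => List.take arr.length row)).map
        (fun r => (r.length : Int))) (fun x => x)).getD 0 = (arr.length : Int) := by
    cases arr with
    | nil => rfl
    | cons a t =>
      have hmapeq : ((a :: t).map (fun row => List.take (a :: t).length row)).map
          (fun r => (r.length : Int)) = ((a :: t).map (fun _ => ((a :: t).length : Int))) := by
        simp only [List.map_map]
        apply List.map_congr_left
        intro row hrow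
        have := hfull row hrow
        simp only [Function.comp_apply, List.length_take]
        congr 1
        omega
      rw [hmapeq]
      simp only [List.map_cons]
      rw [PySem.List.min?_id_cons]
      simp only [Option.getD_some]
      apply foldl_min_const
      intro x hx
      simp only [List.mem_map] at hx
      obtain ⟨y, _, hy⟩ := hx
      omega
  rw [hm]
  -- replace B's per-line cut/gap body by max best (longestRun seq), under the invariant 1 ≤ best
  have hbody : (((arr.map (fun row => List.take arr.length row)) ++
        (PySem.List.pyRange 0 (arr.length : Int) 1).map
          (fun i => (arr.map (fun row => List.take arr.length row)).map
            (fun row => PySem.List.pyGetD row i 0))).foldl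
      (fun best seq =>
        let L : Int := seq.length
        let cuts := [(0 : Int)] ++ (PySem.List.pyRange 1 L 1).filter
            (fun k => PySem.List.pyGetD seq k 0 != PySem.List.pyGetD seq (k - 1) 0) ++ [L]
        (cuts.zip cuts.tail).foldl
          (fun best ab => if ab.2 - ab.1 > best then ab.2 - ab.1 else best) best) 1)
      = (((arr.map (fun row => List.take arr.length row)) ++
        (PySem.List.pyRange 0 (arr.length : Int) 1).map
          (fun i => (arr.map (fun row => List.take arr.length row)).map
            (fun row => PySem.List.pyGetD row i 0))).foldl
      (fun best seq => max best (longestRun seq)) 1) := by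
    apply foldl_inv_congr _ _ (fun b => 1 ≤ b) _ 1 (by norm_num)
    intro seq _ b hb
    constructor
    · exact line_eq seq b hb
    · have : 1 ≤ longestRun seq := by
        cases seq with
        | nil => simp [longestRun]
        | cons h t => exact pvStep_best_ge_one t 1 h
      omega
  rw [hbody, List.foldl_append]
  -- rows pass
  have hrows : (arr.map (fun row => List.take arr.length row)).foldl
      (fun best seq => max best (longestRun seq)) 1
      = (PySem.List.pyRange 0 (arr.length : Int) 1).foldl (fun a i => max a (rF arr i)) 1 := by
    rw [List.foldl_map]
    rw [← PySem.List.foldl_pyRange_zero_pyGetD' arr ([] : List Int)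
        (fun best row => max best (longestRun (List.take arr.length row))) 1]
    simp only [rF, rowList]
  rw [hrows]
  -- columns pass
  rw [List.foldl_map]
  apply PySem.List.foldl_congr_mem
  intro acc i hi
  rw [PySem.List.mem_pyRange_one] at hi
  have hmap : (arr.map (fun row => List.take arr.length row)).map
      (fun row => PySem.List.pyGetD row i 0) = colList arr i := by
    rw [List.map_map, colList]
    apply List.map_congr_left
    intro row hrow
    have hlen := hfull row hrow
    simp only [Function.comp_apply]
    rw [PySem.List.pyGetD_eq_getElem _ 0 (by omega)
          (by simp only [List.length_take]; omega),
        PySem.List.pyGetD_eq_getElem row 0 (by omega) (by omega),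
        List.getElem_take]
  rw [hmap, cF]

-- ===== VERDICT (by name: the statement is the Claim_ definition above) =====
theorem check_spec : Claim_equal_check := by
  intro arr _ hpre
  show check arr = check_alt arr
  by_cases hfull : ∀ row ∈ arr, arr.length ≤ row.length
  · rw [checkA_eq arr hfull, fold_cr_split (cF arr) (rF arr), checkB_eq arr hfull]
  · have hsmall : arr.length ≤ 1 := by
      cases hpre with
      | inl h => exact h
      | inr h => exact absurd h hfull
    push_neg at hfull
    obtain ⟨row, hmem, hlt⟩ := hfull
    match arr, hmem with
    | [a], hmem =>
      have hrow : row = a := by simpa using hmem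
      subst hrow
      have : row = [] := by
        simp only [List.length_cons, List.length_nil] at hlt
        exact List.eq_nil_of_length_eq_zero (by omega)
      subst this
      decide
    | a :: b :: t, _ => simp at hsmall
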